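-- pv_equiv track=rewrite | github.com/agulaya24/BaseLayer | src/baselayer/author_layers.py | cap_by_category
-- ===== SOURCE A (Python) =====
-- MAX_FACTS_PER_CATEGORY = 15  # Prevents any single topic from dominating retrieval
--
-- def cap_by_category(facts, max_per_category=MAX_FACTS_PER_CATEGORY):
--     """Cap facts per category to ensure topic diversity in retrieval.
--
--     Within each category, facts retain their original sort order (commitment_depth
--     then recurrence). This prevents high-recurrence domains (e.g., trading) from
--     crowding out lower-recurrence but identity-significant topics (e.g., hobbies).
--     """
--     by_cat = {}
--     for f in facts:
--         cat = f.get("category") or "unknown"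
--         if cat not in by_cat:
--             by_cat[cat] = []
--         by_cat[cat].append(f)
--
--     capped = []
--     for cat, cat_facts in by_cat.items():
--         capped.extend(cat_facts[:max_per_category])
--
--     return capped
-- ===== SOURCE B (Python) =====
-- MAX_FACTS_PER_CATEGORY = 15
--
--
-- def cap_by_category(facts, max_per_category=MAX_FACTS_PER_CATEGORY):
--     """Distinct categories in first-appearance order, then per-category filter scans."""
--     cats = set()  # insertion-ordered via the companion list below
--     order = []
--     for f in facts:
--         c = f.get("category") or "unknown"
--         if c not in cats:
--             cats.add(c)
--             order.append(c)
--     out = []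
--     for c in order:
--         out.extend([f for f in facts if (f.get("category") or "unknown") == c][:max_per_category])
--     return out
-- ===== Notes on version B (the rewrite author's own statement) =====
-- stated objective: idiomatic
-- what changed: Replaces A's single group-into-dict-then-cap pass by a distinct-categories pass followed by one filtering scan of the whole fact list per category (nested traversal), keeping A's exact key expression ('or "unknown"') and slice semantics.
import Mathlib
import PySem

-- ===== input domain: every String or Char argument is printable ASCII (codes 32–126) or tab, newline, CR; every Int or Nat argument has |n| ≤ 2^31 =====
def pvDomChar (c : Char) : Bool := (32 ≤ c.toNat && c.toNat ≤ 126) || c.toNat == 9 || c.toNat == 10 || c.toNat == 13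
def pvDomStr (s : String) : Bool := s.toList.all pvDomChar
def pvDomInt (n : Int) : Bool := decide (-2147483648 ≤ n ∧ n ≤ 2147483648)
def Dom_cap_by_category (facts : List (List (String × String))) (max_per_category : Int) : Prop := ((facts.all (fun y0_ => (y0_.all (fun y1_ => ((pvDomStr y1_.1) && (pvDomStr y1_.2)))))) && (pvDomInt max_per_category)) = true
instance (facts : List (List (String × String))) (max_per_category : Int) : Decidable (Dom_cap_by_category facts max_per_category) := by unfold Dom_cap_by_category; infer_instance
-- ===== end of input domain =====

-- B is an idiomatic restructuring (distinct-categories pass + one filtering scan per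
-- category) of A's group-into-dict-then-cap pass; same return value, no speed claim.

-- ===== PORT A =====
-- f.get("category") or "unknown"   (shared key expression, used verbatim by both Pythons)
def pvCat (f : List (String × String)) : String :=
  match (PySem.Dict.mk f).get? "category" with
  | some s => if s == "" then "unknown" else s
  | none => "unknown"

def cap_by_category (facts : List (List (String × String))) (max_per_category : Int) : List (List (String × String)) :=
  -- by_cat = {}; for f in facts: cat = …; if cat not in by_cat: by_cat[cat] = []; by_cat[cat].append(f)
  let by_cat : PySem.Dict String (List (List (String × String))) :=
    facts.foldl (fun d f =>
      let cat := pvCat f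
      let d' := if d.contains cat then d else d.insert cat []
      d'.modify cat [] (fun l => l ++ [f])) PySem.Dict.empty
  -- capped = []; for cat, cat_facts in by_cat.items(): capped.extend(cat_facts[:max_per_category])
  by_cat.items.foldl (fun capped p => capped ++ PySem.List.slice p.2 none (some max_per_category)) []

-- ===== PORT B =====
def cap_by_category_alt (facts : List (List (String × String))) (max_per_category : Int) : List (List (String × String)) :=
  -- distinct categories in first-appearance order (set + ordered list in Source B = PySem.Set)
  let order : PySem.Set String := facts.foldl (fun s f => PySem.Set.add s (pvCat f)) PySem.Set.empty
  -- for c in order: out.extend([f for f in facts if (…) == c][:max_per_category])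
  order.foldl (fun out c =>
    out ++ PySem.List.slice (facts.filter (fun f => pvCat f == c)) none (some max_per_category)) []

-- ===== PRECONDITION & SPEC =====
def Spec_cap_by_category (facts : List (List (String × String))) (max_per_category : Int) (out : List (List (String × String))) : Prop := out = cap_by_category_alt facts max_per_category
instance (facts : List (List (String × String))) (max_per_category : Int) (out : List (List (String × String))) : Decidable (Spec_cap_by_category facts max_per_category out) := by unfold Spec_cap_by_category; infer_instance

-- ===== CLAIM (what is proved, stated in full; the proofs are below) =====
def Claim_equal_cap_by_category : Prop := ∀ (facts : List (List (String × String))) (max_per_category : Int), Dom_cap_by_category facts max_per_category → Spec_cap_by_category facts max_per_category (cap_by_category facts max_per_category)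

-- ===== LEMMAS AND PROOFS =====

-- A's "if absent insert [] then append" step is the plain modify step.
theorem stepA_eq (d : PySem.Dict String (List (List (String × String)))) (f : List (String × String)) :
    (let cat := pvCat f
     let d' := if d.contains cat then d else d.insert cat []
     d'.modify cat [] (fun l => l ++ [f])) =
    d.modify (pvCat f) [] (fun l => l ++ [f]) := by
  by_cases h : d.contains (pvCat f) = true
  · simp only [h, if_true]
  · rw [Bool.not_eq_true] at h
    simp only [h, Bool.false_eq_true, if_false]
    have h' : (d.items.any fun p => p.1 == pvCat f) = false := h
    have hmem : ∀ p ∈ d.items, ¬ (p.1 = pvCat f) := by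
      rw [List.any_eq_false] at h'
      intro p hp hpc
      exact absurd hpc (by simpa using h' p hp)
    have hmap : ∀ (v : String × List (List (String × String))),
        List.map (fun p => if p.1 = pvCat f then v else p) d.items = d.items := by
      intro v
      conv_rhs => rw [← List.map_id d.items]
      exact List.map_congr_left (fun p hp => by rw [if_neg (hmem p hp)]; rfl)
    apply PySem.Dict.ext
    simp [PySem.Dict.modify, PySem.Dict.insert, PySem.Dict.contains, PySem.Dict.getD,
      PySem.Dict.get?, h', List.any_append, hmap]
    have hf : List.find? (fun p => p.1 == pvCat f) d.items = none := by
      rw [List.find?_eq_none]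
      intro p hp
      simpa using hmem p hp
    simp [hf]

-- A's grouping fold, rewritten as the canonical pair-keyed modify loop.
theorem dictA_eq (facts : List (List (String × String))) :
    facts.foldl (fun d f =>
      let cat := pvCat f
      let d' := if d.contains cat then d else d.insert cat []
      d'.modify cat [] (fun l => l ++ [f])) PySem.Dict.empty =
    (facts.map (fun f => (pvCat f, f))).foldl
      (fun d p => d.modify p.1 [] (fun l => l ++ [p.2])) PySem.Dict.empty := by
  rw [List.foldl_map]
  congr 1
  funext d f
  exact stepA_eq d f

-- ===== VERDICT (by name: the statement is the Claim_ definition above) =====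
-- (pv_main is the proof's workhorse)
theorem pv_main (facts : List (List (String × String))) (m : Int) :
    cap_by_category facts m = cap_by_category_alt facts m := by
  simp only [cap_by_category, cap_by_category_alt]
  rw [dictA_eq]
  set D := (facts.map (fun f => (pvCat f, f))).foldl
      (fun d p => d.modify p.1 [] (fun l => l ++ [p.2])) PySem.Dict.empty with hD
  have hnd : D.keys.Nodup := by
    rw [hD]
    exact PySem.Dict.nodup_keys_foldl_modify_key _ Prod.fst _ _ _ (by simp [PySem.Dict.keys_empty])
  have hkeys : D.keys = PySem.Set.ofList (facts.map pvCat) := by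
    rw [hD, PySem.Dict.keys_foldl_modify_key]
    simp [PySem.Set.update_nil_left, List.map_map, Function.comp_def]
  have hval : ∀ c, D.getD c [] = facts.filter (fun f => pvCat f == c) := by
    intro c
    rw [hD, PySem.Dict.getD_foldl_modify_append]
    simp [List.filter_map, List.map_map, Function.comp_def]
  rw [PySem.Dict.items_eq_map_keys D hnd []]
  rw [PySem.List.foldl_append_eq_flatMap, List.flatMap_map]
  rw [← PySem.Set.update_map_eq_foldl_add, PySem.Set.update_empty]
  rw [PySem.List.foldl_append_eq_flatMap]
  rw [hkeys]
  simp only [List.nil_append]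
  congr 1
  funext c
  rw [hval]

theorem cap_by_category_spec : Claim_equal_cap_by_category := by
  intro facts m _
  exact pv_main facts m
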